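-- pv_equiv track=rewrite | github.com/vlegaria/air_pollution | traffic_flow/vector/utils_TomTom.py | decode_geometry
-- ===== SOURCE A (Python) =====
-- def decode_geometry(geometry):
--     c = 0
--     decodeTiles = []
--     lines =[]
--     decode_x = 0
--     decode_y = 0
--     while c < len(geometry):
--         command_and_count = geometry[c]
--         command = command_and_count & 0x7
--         count = command_and_count >> 0x3
--         for _ in range(count):
--             x = geometry[c+1]
--             y = geometry[c+2]
--             decode_x += ((x >> 0x1) ^ (-(x & 0x1)))
--             decode_y += ((y >> 0x1) ^ (-(y & 0x1)))
--             if command==1: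
--                 if len(decodeTiles)==0:
--                     decodeTiles.append([decode_x, decode_y])
--                 else:
--                     lines.append(decodeTiles)
--                     decodeTiles = []
--                     decodeTiles.append([decode_x, decode_y])
--             elif command==2:
--                 decodeTiles.append([decode_x, decode_y])
--             c += 2
--         if command==2:
--             lines.append(decodeTiles)
--         c += 1
--     return lines
-- ===== SOURCE B (Python) =====
-- def _zigzag(v):
--     return (v >> 1) ^ -(v & 1)
--
--
-- def _parse(geometry):
--     """Parse the flat array into (command, decoded points) records."""
--     records = []
--     x = 0
--     y = 0
--     i = 0
--     while i < len(geometry):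
--         word = geometry[i]
--         command = word & 0x7
--         count = word >> 0x3
--         pts = []
--         for j in range(count):
--             x += _zigzag(geometry[i + 1 + 2 * j])
--             y += _zigzag(geometry[i + 2 + 2 * j])
--             pts.append([x, y])
--         records.append((command, pts))
--         i += 1 + 2 * len(pts)
--     return records
--
--
-- def decode_geometry(geometry):
--     lines = []
--     buf = []
--     for command, pts in _parse(geometry):
--         if command == 1:
--             for p in pts:
--                 if buf:
--                     lines.append(buf)
--                     buf = [p]
--                 else:
--                     buf.append(p)
--         elif command == 2:
--             buf.extend(pts)
--             lines.append(buf)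
--     return lines
-- ===== Notes on version B (the rewrite author's own statement) =====
-- stated objective: alternative
-- what changed: B splits A's single interleaved cursor loop into two passes: first parse the flat array into (command, decoded-point-list) records with a running zigzag accumulator, then a simple grouping loop over the records builds the lines with a mutable buffer appended by reference.
import Mathlib
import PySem

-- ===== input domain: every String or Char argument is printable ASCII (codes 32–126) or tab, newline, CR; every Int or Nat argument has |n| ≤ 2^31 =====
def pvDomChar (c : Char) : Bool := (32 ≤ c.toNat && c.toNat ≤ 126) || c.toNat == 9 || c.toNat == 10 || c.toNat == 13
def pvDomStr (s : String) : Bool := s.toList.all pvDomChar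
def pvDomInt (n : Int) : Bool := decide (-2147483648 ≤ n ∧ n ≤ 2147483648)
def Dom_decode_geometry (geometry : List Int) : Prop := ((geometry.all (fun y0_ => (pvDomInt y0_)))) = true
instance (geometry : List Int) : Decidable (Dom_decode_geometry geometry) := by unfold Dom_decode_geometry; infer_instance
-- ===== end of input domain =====

-- B decodes the flat array in two passes — parse (command, points) records, then group them —
-- instead of A's single interleaved cursor loop; objective: alternative decomposition, same cost.
-- Both Pythons append the current line buffer to the result BY REFERENCE and keep mutating it, so
-- each appended entry shows the buffer's content at the time of the next reset (or at the end);
-- both ports model this by keeping a frozen prefix plus a count of trailing references to the live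
-- buffer, realized when the buffer is reset or the loop ends.

-- ===== PORT A =====
-- zigzag decode (v >> 1) ^ -(v & 1); Python's arithmetic shift v >> 1 is exactly floor division by 2
def pvZigA (v : Int) : Int := PySem.Int.bxor (PySem.Int.floordiv v 2) (-(PySem.Int.band v 1))

-- the `for _ in range(count)` body; state = (c, decode_x, decode_y, frozen lines, refs to live buffer, decodeTiles)
def pvAInner (geometry : List Int) (command : Int) :
    Nat → Nat × Int × Int × List (List (List Int)) × Nat × List (List Int) →
          Nat × Int × Int × List (List (List Int)) × Nat × List (List Int)
  | 0, st => st
  | n + 1, (c, dx, dy, fr, k, buf) =>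
    let x := PySem.List.pyGetD geometry ((c : Int) + 1) 0
    let y := PySem.List.pyGetD geometry ((c : Int) + 2) 0
    let dx' := dx + pvZigA x
    let dy' := dy + pvZigA y
    let st' :=
      if command == 1 then
        if buf.length == 0 then (c + 2, dx', dy', fr, k, buf ++ [[dx', dy']])
        else (c + 2, dx', dy', fr ++ List.replicate (k + 1) buf, 0, ([] : List (List Int)) ++ [[dx', dy']])
      else if command == 2 then (c + 2, dx', dy', fr, k, buf ++ [[dx', dy']])
      else (c + 2, dx', dy', fr, k, buf)
    pvAInner geometry command n st'

-- the `while c < len(geometry)` loop; fuel ≥ len − c suffices since c grows by ≥ 1 each turn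
def pvAOuter (geometry : List Int) :
    Nat → Nat × Int × Int × List (List (List Int)) × Nat × List (List Int) → List (List (List Int))
  | 0, (_, _, _, fr, k, buf) => fr ++ List.replicate k buf
  | fuel + 1, (c, dx, dy, fr, k, buf) =>
    if c < geometry.length then
      let w := PySem.List.pyGetD geometry (c : Int) 0
      let command := PySem.Int.band w 7
      let count := PySem.Int.floordiv w 8
      let st := pvAInner geometry command count.toNat (c, dx, dy, fr, k, buf)
      let k' := if command == 2 then st.2.2.2.2.1 + 1 else st.2.2.2.2.1
      pvAOuter geometry fuel (st.1 + 1, st.2.1, st.2.2.1, st.2.2.2.1, k', st.2.2.2.2.2)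
    else fr ++ List.replicate k buf

def decode_geometry (geometry : List Int) : List (List (List Int)) :=
  pvAOuter geometry (geometry.length + 1) (0, 0, 0, [], 0, [])

-- ===== PORT B =====
def pvZigB (v : Int) : Int := PySem.Int.bxor (PySem.Int.floordiv v 2) (-(PySem.Int.band v 1))

-- pass 1 inner for-loop: decode `count` coordinate pairs from the suffix after the header
def pvBPts : List Int → Nat → Int → Int → List (List Int) × Int × Int
  | _, 0, x, y => ([], x, y)
  | rest, j + 1, x, y =>
    let x' := x + pvZigB (PySem.List.pyGetD rest 0 0)
    let y' := y + pvZigB (PySem.List.pyGetD rest 1 0)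
    let (ps, xf, yf) := pvBPts (rest.drop 2) j x' y'
    ([x', y'] :: ps, xf, yf)

-- pass 1 (`_parse`): parse the array into (command, decoded points) records
def pvBParse : List Int → Int → Int → List (Int × List (List Int))
  | [], _, _ => []
  | w :: rest, x, y =>
    let command := PySem.Int.band w 7
    let count := (PySem.Int.floordiv w 8).toNat
    let (pts, x', y') := pvBPts rest count x y
    (command, pts) :: pvBParse (rest.drop (2 * count)) x' y'
  termination_by l => l.length
  decreasing_by simp [List.length_drop]

-- pass 2 per-point action for a MoveTo (command 1) point; state = (frozen lines, refs to live buffer, buffer)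
def pvBMove (st : List (List (List Int)) × Nat × List (List Int)) (p : List Int) :
    List (List (List Int)) × Nat × List (List Int) :=
  let (fr, pd, buf) := st
  if buf ≠ [] then (fr ++ List.replicate (pd + 1) buf, 0, [p]) else (fr, pd, [p])

-- pass 2 per-record action
def pvBStep (st : List (List (List Int)) × Nat × List (List Int)) (rec : Int × List (List Int)) :
    List (List (List Int)) × Nat × List (List Int) :=
  let (fr, pd, buf) := st
  let (command, pts) := rec
  if command == 1 then pts.foldl pvBMove st
  else if command == 2 then (fr, pd + 1, buf ++ pts)
  else st

def decode_geometry_alt (geometry : List Int) : List (List (List Int)) :=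
  let recs := pvBParse geometry 0 0
  let (fr, pd, buf) := recs.foldl pvBStep ([], 0, [])
  fr ++ List.replicate pd buf

-- ===== PRECONDITION & SPEC =====
-- Pre_ holds exactly when every block header's coordinate pairs fit inside the array, i.e. Python A
-- returns normally; on truncated arrays Python A raises IndexError (the ports read a default 0 there,
-- so the equivalence itself holds without the hypothesis).
-- header scan: at each block header `w`, the (w >> 3) coordinate pairs must fit in the array
def pvPreB : List Int → Nat → Bool
  | [], 0 => true
  | [], _ + 1 => false
  | _ :: rest, skip + 1 => pvPreB rest skip
  | w :: rest, 0 => pvPreB rest (2 * (PySem.Int.floordiv w 8).toNat)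

def Pre_decode_geometry (geometry : List Int) : Prop := pvPreB geometry 0 = true

instance (geometry : List Int) : Decidable (Pre_decode_geometry geometry) := by
  unfold Pre_decode_geometry; infer_instance

def pvWitness_decode_geometry : List Int := [9, 2, 2, 18, 2, 0, 0, 2]

def Spec_decode_geometry (geometry : List Int) (out : List (List (List Int))) : Prop := out = decode_geometry_alt geometry
instance (geometry : List Int) (out : List (List (List Int))) : Decidable (Spec_decode_geometry geometry out) := by unfold Spec_decode_geometry; infer_instance

-- ===== CLAIM (what is proved, stated in full; the proofs are below) =====
def Claim_equal_decode_geometry : Prop := ∀ (geometry : List Int), Dom_decode_geometry geometry → Pre_decode_geometry geometry → Spec_decode_geometry geometry (decode_geometry geometry)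

-- ===== LEMMAS AND PROOFS =====

theorem pvZig_eq : pvZigA = pvZigB := rfl

-- index m of the suffix after the header = absolute index c+1+m (both sides default to 0)
theorem pvRead0 (geometry : List Int) (c : Nat) :
    PySem.List.pyGetD (geometry.drop (c + 1)) 0 0 = PySem.List.pyGetD geometry ((c : Int) + 1) 0 := by
  have h1 : ((c : Int) + 1) = ((c + 1 : Nat) : Int) := by push_cast; ring
  rw [h1, PySem.List.pyGetD_natCast]
  simp [pysem, List.getD_eq_getElem?_getD, List.getElem?_drop]

theorem pvRead1 (geometry : List Int) (c : Nat) :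
    PySem.List.pyGetD (geometry.drop (c + 1)) 1 0 = PySem.List.pyGetD geometry ((c : Int) + 2) 0 := by
  have h1 : ((c : Int) + 2) = ((c + 1 + 1 : Nat) : Int) := by push_cast; ring
  rw [h1, PySem.List.pyGetD_natCast]
  simp [pysem, List.getD_eq_getElem?_getD, List.getElem?_drop]

-- the fused inner loop of A = decode the points (pvBPts), then fold the grouping action over them
theorem pvInner_eq (geometry : List Int) (command : Int) (cnt : Nat) :
    ∀ (c : Nat) (dx dy : Int) (fr : List (List (List Int))) (k : Nat) (buf : List (List Int)),
    pvAInner geometry command cnt (c, dx, dy, fr, k, buf) =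
      (let (pts, dx', dy') := pvBPts (geometry.drop (c + 1)) cnt dx dy
       let (fr', k', buf') :=
         if command == 1 then pts.foldl pvBMove (fr, k, buf)
         else if command == 2 then (fr, k, buf ++ pts)
         else (fr, k, buf)
       (c + 2 * cnt, dx', dy', fr', k', buf')) := by
  induction cnt with
  | zero =>
    intro c dx dy fr k buf
    by_cases h1 : command = 1 <;> by_cases h2 : command = 2 <;>
      simp [pvAInner, pvBPts, h1, h2]
  | succ n ih =>
    intro c dx dy fr k buf
    simp only [pvAInner, pvBPts, pvZig_eq, pvRead0, pvRead1, List.drop_drop]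
    rw [show c + 1 + 2 = c + 2 + 1 by omega]
    set x' := dx + pvZigB (PySem.List.pyGetD geometry ((c : Int) + 1) 0) with hx'
    set y' := dy + pvZigB (PySem.List.pyGetD geometry ((c : Int) + 2) 0) with hy'
    rcases hp : pvBPts (geometry.drop (c + 2 + 1)) n x' y' with ⟨pts, xf, yf⟩
    by_cases h1 : command = 1
    · subst h1
      by_cases hb : buf = []
      · simp only [hb, beq_self_eq_true, if_true, List.length_nil, beq_iff_eq,
          List.nil_append]
        rw [ih (c + 2) x' y' fr k [[x', y']], hp]
        simp [pvBMove, show c + 2 + 2 * n = c + 2 * (n + 1) by omega]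
      · simp only [beq_self_eq_true, if_true, List.length_eq_zero_iff, hb, beq_iff_eq, if_false,
          List.nil_append]
        rw [ih (c + 2) x' y' (fr ++ List.replicate (k + 1) buf) 0 [[x', y']], hp]
        simp [pvBMove, hb, show c + 2 + 2 * n = c + 2 * (n + 1) by omega]
    · by_cases h2 : command = 2
      · subst h2
        simp only [beq_self_eq_true, beq_iff_eq, if_false, if_true, show ((2:Int) = 1) = False by simp]
        rw [ih (c + 2) x' y' fr k (buf ++ [[x', y']]), hp]
        simp [show c + 2 + 2 * n = c + 2 * (n + 1) by omega, List.append_assoc]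
      · simp only [beq_iff_eq, h1, h2, if_false]
        rw [ih (c + 2) x' y' fr k buf, hp]
        simp [h1, h2, show c + 2 + 2 * n = c + 2 * (n + 1) by omega]

-- A's while loop from cursor c = B's fold over the records parsed from the suffix at c
theorem pvOuter_eq (geometry : List Int) :
    ∀ (fuel c : Nat) (dx dy : Int) (fr : List (List (List Int))) (k : Nat) (buf : List (List Int)),
    geometry.length ≤ c + fuel →
    pvAOuter geometry fuel (c, dx, dy, fr, k, buf) =
      (let (fr', k', buf') := (pvBParse (geometry.drop c) dx dy).foldl pvBStep (fr, k, buf)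
       fr' ++ List.replicate k' buf') := by
  intro fuel
  induction fuel with
  | zero =>
    intro c dx dy fr k buf h
    have hnil : geometry.drop c = [] := List.drop_eq_nil_of_le (by omega)
    simp [pvAOuter, hnil, pvBParse]
  | succ n ih =>
    intro c dx dy fr k buf h
    by_cases hc : c < geometry.length
    · have hdc : geometry.drop c = PySem.List.pyGetD geometry (c : Int) 0 :: geometry.drop (c + 1) := by
        rw [PySem.List.pyGetD_natCast, List.drop_eq_getElem_cons hc]
        simp [List.getD_eq_getElem?_getD, List.getElem?_eq_getElem hc]
      simp only [pvAOuter, if_pos hc]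
      set w := PySem.List.pyGetD geometry (c : Int) 0 with hw
      set command := PySem.Int.band w 7 with hcmd
      set cnt := (PySem.Int.floordiv w 8).toNat with hcnt
      rw [pvInner_eq]
      rcases hp : pvBPts (geometry.drop (c + 1)) cnt dx dy with ⟨pts, dx', dy'⟩
      rw [hdc, pvBParse]
      simp only [← hcmd, ← hcnt, hp, List.foldl_cons, List.drop_drop]
      rw [show c + 1 + 2 * cnt = c + 2 * cnt + 1 by omega]
      by_cases h1 : command = 1
      · rcases hf : pts.foldl pvBMove (fr, k, buf) with ⟨fr', k', buf'⟩
        have hstep : pvBStep (fr, k, buf) (command, pts) = (fr', k', buf') := by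
          simp [pvBStep, h1, hf]
        rw [hstep]
        simp only [h1, beq_self_eq_true, if_true]
        have hne2 : ¬ ((1 : Int) == 2) = true := by decide
        simp only [hne2]
        exact ih (c + 2 * cnt + 1) dx' dy' fr' k' buf' (by omega)
      · by_cases h2 : command = 2
        · have hstep : pvBStep (fr, k, buf) (command, pts) = (fr, k + 1, buf ++ pts) := by
            simp [pvBStep, h2]
          rw [hstep]
          simp only [h2, beq_iff_eq, beq_self_eq_true, if_true]
          exact ih (c + 2 * cnt + 1) dx' dy' fr (k + 1) (buf ++ pts) (by omega)
        · have hstep : pvBStep (fr, k, buf) (command, pts) = (fr, k, buf) := by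
            simp [pvBStep, h1, h2]
          rw [hstep]
          simp only [h1, h2, beq_iff_eq, if_false]
          exact ih (c + 2 * cnt + 1) dx' dy' fr k buf (by omega)
    · have hnil : geometry.drop c = [] := List.drop_eq_nil_of_le (by omega)
      simp [pvAOuter, hc, hnil, pvBParse]

-- ===== VERDICT (by name: the statement is the Claim_ definition above) =====
theorem decode_geometry_spec : Claim_equal_decode_geometry := by
  intro geometry _ _
  unfold Spec_decode_geometry decode_geometry decode_geometry_alt
  rw [pvOuter_eq geometry (geometry.length + 1) 0 0 0 [] 0 [] (by omega)]
  simp
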